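-- pv_equiv track=rewrite | github.com/Fortunoxx/AdventOfCode2025 | src/day04.py | calc
-- ===== SOURCE A (Python) =====
-- def calc(positions, max=4):
--     allowed = []
--     for pos in positions:
--         cnt = 0
--         for x in range(-1, 2):
--             for y in range(-1, 2):
--                 newPos = (x + pos[0], y + pos[1])
--                 if newPos in positions and newPos != pos:
--                     cnt += 1
--         if cnt < max:
--             allowed.append(pos)
--     return allowed
-- ===== SOURCE B (Python) =====
-- OFFSETS = [(-1, -1), (-1, 0), (-1, 1), (0, -1), (0, 1), (1, -1), (1, 0), (1, 1)]
--
-- def calc(positions, max=4):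
--     posset = set(positions)
--     count = {p: 0 for p in posset}
--     for p in posset:
--         for dx, dy in OFFSETS:
--             q = (p[0] + dx, p[1] + dy)
--             if q in count:
--                 count[q] += 1
--     return [pos for pos in positions if count[pos] < max]
-- ===== Notes on version B (the rewrite author's own statement) =====
-- stated objective: faster
-- what changed: Replaced A's per-position gather (scanning the whole positions list for each of the 9 offsets of every position) by a scatter: build a hash-set and a neighbor-count dict in one pass over the distinct positions, then filter the original list against the table.
import Mathlib
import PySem

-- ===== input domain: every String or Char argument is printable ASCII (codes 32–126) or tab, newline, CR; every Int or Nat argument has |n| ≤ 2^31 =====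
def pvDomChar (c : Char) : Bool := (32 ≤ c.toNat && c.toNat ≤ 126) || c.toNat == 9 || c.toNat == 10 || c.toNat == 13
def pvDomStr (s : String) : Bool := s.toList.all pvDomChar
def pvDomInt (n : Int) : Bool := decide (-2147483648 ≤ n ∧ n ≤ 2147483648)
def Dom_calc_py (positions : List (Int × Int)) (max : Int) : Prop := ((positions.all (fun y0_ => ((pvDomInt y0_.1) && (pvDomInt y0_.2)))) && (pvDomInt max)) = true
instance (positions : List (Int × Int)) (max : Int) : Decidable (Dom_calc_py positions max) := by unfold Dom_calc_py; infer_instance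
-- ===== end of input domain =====

-- B replaces A's per-position gather over the whole positions list by a scatter into a
-- neighbor-count dict built once over set(positions), then a single filter pass; same return value.

-- ===== PORT A =====
def calc_py (positions : List (Int × Int)) (max : Int) : List (Int × Int) :=
  positions.foldl (fun allowed pos =>
    let cnt : Int :=
      (PySem.List.pyRange (-1) 2 1).foldl (fun cnt x =>
        (PySem.List.pyRange (-1) 2 1).foldl (fun cnt y =>
          let newPos := (x + pos.1, y + pos.2)
          if newPos ∈ positions ∧ newPos ≠ pos then cnt + 1 else cnt) cnt) 0
    if cnt < max then allowed ++ [pos] else allowed) []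

-- ===== PORT B =====
-- the 8 neighbour offsets (Python module constant OFFSETS)
def pvOffsT : List (Int × Int) := [(-1,-1), (-1,0), (-1,1), (0,-1), (0,1), (1,-1), (1,0), (1,1)]

def calc_py_alt (positions : List (Int × Int)) (max : Int) : List (Int × Int) :=
  let posset : PySem.Set (Int × Int) := PySem.Set.ofList positions
  let count0 : PySem.Dict (Int × Int) Int :=
    posset.foldl (fun d p => d.insert p 0) PySem.Dict.empty
  let count : PySem.Dict (Int × Int) Int :=
    posset.foldl (fun d p =>
      pvOffsT.foldl (fun d off =>
        let q := (p.1 + off.1, p.2 + off.2)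
        if d.contains q then d.modify q 0 (· + 1) else d) d) count0
  positions.filter (fun pos => decide (count.getD pos 0 < max))

-- ===== PRECONDITION & SPEC =====
def Spec_calc_py (positions : List (Int × Int)) (max : Int) (out : List (Int × Int)) : Prop := out = calc_py_alt positions max
instance (positions : List (Int × Int)) (max : Int) (out : List (Int × Int)) : Decidable (Spec_calc_py positions max out) := by unfold Spec_calc_py; infer_instance

-- ===== CLAIM (what is proved, stated in full; the proofs are below) =====
def Claim_equal_calc_py : Prop := ∀ (positions : List (Int × Int)) (max : Int), Dom_calc_py positions max → Spec_calc_py positions max (calc_py positions max)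

-- ===== LEMMAS AND PROOFS =====

-- the dict after the initialisation fold contains exactly the keys of the folded list (plus d's)
theorem pvContains0 (l : List (Int × Int)) (d : PySem.Dict (Int × Int) Int) (q : Int × Int) :
    (l.foldl (fun d p => d.insert p 0) d).contains q = (decide (q ∈ l) || d.contains q) := by
  induction l generalizing d with
  | nil => simp
  | cons p l ih =>
    simp only [List.foldl_cons, ih, PySem.Dict.contains_insert, List.mem_cons]
    by_cases h : q = p
    · simp [h]
    · have hb : (q == p) = false := beq_eq_false_iff_ne.mpr h
      simp [h, hb]

-- the initialisation fold stores 0 everywhere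
theorem pvGetD0 (l : List (Int × Int)) (d : PySem.Dict (Int × Int) Int) (q : Int × Int)
    (h : d.getD q 0 = 0) : (l.foldl (fun d p => d.insert p 0) d).getD q 0 = 0 := by
  induction l generalizing d with
  | nil => simpa using h
  | cons p l ih =>
    simp only [List.foldl_cons]
    exact ih _ (by rw [PySem.Dict.getD_insert]; split <;> simp [h])

-- the inner offset loop of B adds, at each key pos ∈ S, the number of offsets o with p + o = pos
theorem pvInner (S : List (Int × Int)) (offs : List (Int × Int)) (p : Int × Int)
    (d : PySem.Dict (Int × Int) Int) (hc : ∀ q, d.contains q = decide (q ∈ S)) :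
    (∀ q, (offs.foldl (fun d off =>
        if d.contains (p.1 + off.1, p.2 + off.2) then d.modify (p.1 + off.1, p.2 + off.2) 0 (· + 1) else d) d).contains q = decide (q ∈ S)) ∧
    (∀ pos ∈ S, (offs.foldl (fun d off =>
        if d.contains (p.1 + off.1, p.2 + off.2) then d.modify (p.1 + off.1, p.2 + off.2) 0 (· + 1) else d) d).getD pos 0
      = d.getD pos 0 + (offs.map (fun o => if (p.1 + o.1, p.2 + o.2) = pos then (1:Int) else 0)).sum) := by
  induction offs generalizing d with
  | nil => exact ⟨hc, by simp⟩
  | cons o offs ih =>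
    have hc' : ∀ q, (if d.contains (p.1 + o.1, p.2 + o.2) then d.modify (p.1 + o.1, p.2 + o.2) 0 (· + 1) else d).contains q = decide (q ∈ S) := by
      intro q
      by_cases hg : d.contains (p.1 + o.1, p.2 + o.2) = true
      · have hmem : (p.1 + o.1, p.2 + o.2) ∈ S := by
          have := hc (p.1 + o.1, p.2 + o.2); rw [hg] at this
          exact of_decide_eq_true this.symm
        rw [if_pos hg]
        simp only [PySem.Dict.contains_modify, hc]
        by_cases hq : q = (p.1 + o.1, p.2 + o.2)
        · simp [hq, hmem]
        · simp [hq]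
      · rw [if_neg hg]; exact hc q
    obtain ⟨ih1, ih2⟩ := ih _ hc'
    refine ⟨by simpa using ih1, ?_⟩
    intro pos hpos
    simp only [List.foldl_cons, List.map_cons, List.sum_cons]
    rw [ih2 pos hpos]
    have hval : (if d.contains (p.1 + o.1, p.2 + o.2) then d.modify (p.1 + o.1, p.2 + o.2) 0 (· + 1) else d).getD pos 0
        = d.getD pos 0 + (if (p.1 + o.1, p.2 + o.2) = pos then (1:Int) else 0) := by
      by_cases hg : d.contains (p.1 + o.1, p.2 + o.2) = true
      · rw [if_pos hg, PySem.Dict.getD_modify]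
        split_ifs with h1 h2 h3
        · rw [h1]
        · exact absurd h1.symm h2
        · exact absurd h3.symm h1
        · rw [add_zero]
      · have hne : (p.1 + o.1, p.2 + o.2) ≠ pos := by
          intro he; apply hg; rw [he, hc]; simpa using hpos
        rw [if_neg hg, if_neg hne, add_zero]
    rw [hval]; ring

-- the outer loop of B accumulates the double sum of indicators
theorem pvOuter (S ps : List (Int × Int)) (offs : List (Int × Int))
    (d : PySem.Dict (Int × Int) Int) (hc : ∀ q, d.contains q = decide (q ∈ S)) :
    (∀ q, (ps.foldl (fun d p => offs.foldl (fun d off =>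
        if d.contains (p.1 + off.1, p.2 + off.2) then d.modify (p.1 + off.1, p.2 + off.2) 0 (· + 1) else d) d) d).contains q = decide (q ∈ S)) ∧
    (∀ pos ∈ S, (ps.foldl (fun d p => offs.foldl (fun d off =>
        if d.contains (p.1 + off.1, p.2 + off.2) then d.modify (p.1 + off.1, p.2 + off.2) 0 (· + 1) else d) d) d).getD pos 0
      = d.getD pos 0 + (ps.map (fun p => (offs.map (fun o => if (p.1 + o.1, p.2 + o.2) = pos then (1:Int) else 0)).sum)).sum) := by
  induction ps generalizing d with
  | nil => exact ⟨hc, by simp⟩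
  | cons p ps ih =>
    obtain ⟨h1, h2⟩ := pvInner S offs p d hc
    obtain ⟨ih1, ih2⟩ := ih _ h1
    refine ⟨by simpa using ih1, ?_⟩
    intro pos hpos
    simp only [List.foldl_cons, List.map_cons, List.sum_cons]
    rw [ih2 pos hpos, h2 pos hpos]; ring

theorem pvSumAdd {β : Type} (l : List β) (f g : β → Int) :
    (l.map (fun b => f b + g b)).sum = (l.map f).sum + (l.map g).sum := by
  induction l with
  | nil => simp
  | cons b l ih => simp [ih]; ring

-- exchange the two summations
theorem pvSwap {α β : Type} (l1 : List α) (l2 : List β) (f : α → β → Int) :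
    (l1.map (fun a => (l2.map (f a)).sum)).sum = (l2.map (fun b => (l1.map (fun a => f a b)).sum)).sum := by
  induction l1 with
  | nil => simp
  | cons a l1 ih =>
    simp only [List.map_cons, List.sum_cons, ih, pvSumAdd]

-- an indicator sum over a duplicate-free list is a membership test
theorem pvSingle (S : List (Int × Int)) (v : Int × Int) (hnd : S.Nodup) :
    (S.map (fun p => if p = v then (1:Int) else 0)).sum = if v ∈ S then 1 else 0 := by
  induction S with
  | nil => simp
  | cons p S ih =>
    simp only [List.nodup_cons] at hnd
    simp only [List.map_cons, List.sum_cons, List.mem_cons, ih hnd.2]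
    by_cases h : p = v
    · subst h; simp [hnd.1]
    · have h2 : ¬ v = p := fun hv => h hv.symm
      simp [h, h2]

theorem pvCond (o1 o2 a b : Int) (h1 : o1 + a = 0) (h2 : o2 + b = 0) (p pos : Int × Int) :
    ((p.1 + o1, p.2 + o2) = pos) ↔ (p = (a + pos.1, b + pos.2)) := by
  obtain ⟨p1, p2⟩ := p; obtain ⟨q1, q2⟩ := pos
  simp only [Prod.mk.injEq]
  omega

theorem pvNe (o1 o2 : Int) (h : o1 ≠ 0 ∨ o2 ≠ 0) (pos : Int × Int) :
    ((o1 + pos.1, o2 + pos.2) = pos) ↔ False := by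
  obtain ⟨q1, q2⟩ := pos
  simp only [Prod.mk.injEq, iff_false, not_and]
  omega

theorem pvEq0 (pos : Int × Int) : ((0 + pos.1, 0 + pos.2) = pos) ↔ True := by
  simp

theorem pvIteAdd (c : Prop) [Decidable c] (e : Int) : (if c then e + 1 else e) = e + (if c then 1 else 0) := by
  split <;> simp

theorem pvRangeEval : PySem.List.pyRange (-1) 2 1 = [-1, 0, 1] := by decide

-- the heart of the proof: B's finished count at pos ∈ positions equals A's gathered cnt at pos
set_option maxHeartbeats 1000000 in
theorem pvCount (positions : List (Int × Int)) (pos : Int × Int) (hpos : pos ∈ positions) :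
    (((PySem.Set.ofList positions).foldl (fun d p => pvOffsT.foldl (fun d off =>
        if d.contains (p.1 + off.1, p.2 + off.2) then d.modify (p.1 + off.1, p.2 + off.2) 0 (· + 1) else d) d)
      ((PySem.Set.ofList positions).foldl (fun d p => d.insert p 0) (PySem.Dict.empty : PySem.Dict (Int × Int) Int))).getD pos 0)
    = (PySem.List.pyRange (-1) 2 1).foldl (fun cnt x => (PySem.List.pyRange (-1) 2 1).foldl (fun cnt y =>
        if (x + pos.1, y + pos.2) ∈ positions ∧ (x + pos.1, y + pos.2) ≠ pos then cnt + 1 else cnt) cnt) 0 := by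
  have hS : ∀ q : Int × Int, q ∈ PySem.Set.ofList positions ↔ q ∈ positions := fun q => PySem.Set.mem_ofList _ _
  have hposS : pos ∈ PySem.Set.ofList positions := (hS pos).mpr hpos
  have hc0 : ∀ q, (((PySem.Set.ofList positions).foldl (fun d p => d.insert p 0) (PySem.Dict.empty : PySem.Dict (Int × Int) Int))).contains q
      = decide (q ∈ PySem.Set.ofList positions) := by
    intro q; rw [pvContains0]; simp
  obtain ⟨_, houter⟩ := pvOuter (PySem.Set.ofList positions) (PySem.Set.ofList positions) pvOffsT _ hc0
  rw [houter pos hposS, pvGetD0 _ _ _ (PySem.Dict.getD_empty _ _), zero_add]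
  rw [pvSwap]
  have hnd := PySem.Set.nodup_ofList (xs := positions)
  rw [pvRangeEval]
  simp only [pvOffsT, List.map_cons, List.map_nil, List.sum_cons, List.sum_nil,
    pvCond (-1) (-1) 1 1 (by norm_num) (by norm_num),
    pvCond (-1) 0 1 0 (by norm_num) (by norm_num),
    pvCond (-1) 1 1 (-1) (by norm_num) (by norm_num),
    pvCond 0 (-1) 0 1 (by norm_num) (by norm_num),
    pvCond 0 1 0 (-1) (by norm_num) (by norm_num),
    pvCond 1 (-1) (-1) 1 (by norm_num) (by norm_num),
    pvCond 1 0 (-1) 0 (by norm_num) (by norm_num),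
    pvCond 1 1 (-1) (-1) (by norm_num) (by norm_num)]
  simp only [pvSingle _ _ hnd, hS]
  simp only [List.foldl_cons, List.foldl_nil]
  simp only [pvNe (-1) (-1) (by norm_num), pvNe (-1) 0 (by norm_num), pvNe (-1) 1 (by norm_num),
    pvNe 0 (-1) (by norm_num), pvNe 0 1 (by norm_num),
    pvNe 1 (-1) (by norm_num), pvNe 1 0 (by norm_num), pvNe 1 1 (by norm_num),
    pvEq0, ne_eq, not_true, not_false_iff, and_true, and_false, if_false]
  simp only [pvIteAdd]
  ring

-- ===== VERDICT (by name: the statement is the Claim_ definition above) =====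
theorem calc_py_spec : Claim_equal_calc_py := by
  unfold Claim_equal_calc_py Spec_calc_py
  intro positions max _
  unfold calc_py calc_py_alt
  rw [PySem.List.foldl_append_ite_eq_filter, List.nil_append]
  apply List.filter_congr
  intro pos hpos
  simp only [decide_eq_decide]
  rw [pvCount positions pos hpos]
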